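-- pv_equiv track=rewrite | github.com/sidb95/code-problems | leetcode/contests/136/C.py | calcAnswer
-- ===== SOURCE A (Python) =====
-- def calcAnswer(n, pick):
--     dictP = {}
--     count = 0
--     for elmt in pick:
--         if (elmt[0] in dictP):
--             if (elmt[1] in dictP[elmt[0]]):
--                 dictP[elmt[0]][elmt[1]] += 1
--             else:
--                 dictP[elmt[0]][elmt[1]] = 1
--         else:
--             dictP[elmt[0]] = {}
--             dictP[elmt[0]][elmt[1]] = 1
--     for p in dictP.keys():
--         v1 = max(list(dictP[p].values()))
--         if (v1 > p):
--             count += 1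
--     return count
-- ===== SOURCE B (Python) =====
-- def calcAnswer(n, pick):
--     firsts = list(dict.fromkeys(p for p, _ in pick))
--     return sum(1 for p in firsts
--                if max(pick.count(e) for e in pick if e[0] == p) > p)
-- ===== Notes on version B (the rewrite author's own statement) =====
-- stated objective: simpler
-- what changed: Drops A's nested dict-of-dicts entirely: B dedups the first coordinates in order and, for each, brute-force scans the list with list.count to find the largest pair multiplicity, trading A's hash tables for direct quadratic scans.
import Mathlib
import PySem

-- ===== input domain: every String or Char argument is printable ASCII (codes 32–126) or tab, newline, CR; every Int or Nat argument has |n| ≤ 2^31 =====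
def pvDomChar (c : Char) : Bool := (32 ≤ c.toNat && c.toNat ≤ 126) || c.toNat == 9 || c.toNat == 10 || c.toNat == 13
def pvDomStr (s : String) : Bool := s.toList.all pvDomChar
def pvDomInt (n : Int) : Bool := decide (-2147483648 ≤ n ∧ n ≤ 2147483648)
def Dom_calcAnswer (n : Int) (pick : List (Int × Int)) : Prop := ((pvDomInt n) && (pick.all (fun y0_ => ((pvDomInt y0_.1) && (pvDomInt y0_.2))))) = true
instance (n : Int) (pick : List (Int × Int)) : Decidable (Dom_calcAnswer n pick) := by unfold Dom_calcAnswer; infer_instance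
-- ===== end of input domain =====

-- B removes A's nested dict-of-dicts: it dedups the first coordinates and brute-force scans the
-- list with list.count for each group's largest pair multiplicity (simpler, no hash tables; not faster).


-- ===== PORT A =====
-- one iteration of A's first loop (the nested-dict update, branches in source order)
def calcAnswerStepA (d : PySem.Dict Int (PySem.Dict Int Int)) (e : Int × Int) :
    PySem.Dict Int (PySem.Dict Int Int) :=
  if d.contains e.1 then
    let inner := d.getD e.1 PySem.Dict.empty
    if inner.contains e.2 then
      d.insert e.1 (inner.insert e.2 (inner.getD e.2 0 + 1))
    else
      d.insert e.1 (inner.insert e.2 1)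
  else
    d.insert e.1 ((PySem.Dict.empty : PySem.Dict Int Int).insert e.2 1)

def calcAnswer (n : Int) (pick : List (Int × Int)) : Int :=
  let dictP := pick.foldl calcAnswerStepA PySem.Dict.empty
  dictP.keys.foldl (fun count p =>
    match PySem.List.max? (dictP.getD p PySem.Dict.empty).values (fun x => x) with
    | some v1 => if v1 > p then count + 1 else count
    | none => count  -- unreachable: Python's max would raise, but every inner dict is nonempty
    ) 0

-- ===== PORT B =====
-- B's per-first predicate: max(pick.count(e) for e in pick if e[0] == p) > p
def calcAnswerPredB (pick : List (Int × Int)) (p : Int) : Bool :=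
  match PySem.List.max?
      ((pick.filter (fun e => e.1 == p)).map (fun e => (PySem.List.count pick e : Int)))
      (fun x => x) with
  | some v => decide (v > p)
  | none => false  -- unreachable for p drawn from firsts: the filtered list is nonempty (Python max would raise)

def calcAnswer_alt (n : Int) (pick : List (Int × Int)) : Int :=
  let firsts := PySem.List.dedup (pick.map Prod.fst)   -- list(dict.fromkeys(...))
  ((firsts.filter (calcAnswerPredB pick)).length : Int)

-- ===== PRECONDITION & SPEC =====
def Spec_calcAnswer (n : Int) (pick : List (Int × Int)) (out : Int) : Prop := out = calcAnswer_alt n pick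
instance (n : Int) (pick : List (Int × Int)) (out : Int) : Decidable (Spec_calcAnswer n pick out) := by unfold Spec_calcAnswer; infer_instance

-- ===== CLAIM (what is proved, stated in full; the proofs are below) =====
def Claim_equal_calcAnswer : Prop := ∀ (n : Int) (pick : List (Int × Int)), Dom_calcAnswer n pick → Spec_calcAnswer n pick (calcAnswer n pick)

-- ===== LEMMAS AND PROOFS =====

-- invariant of A's nested dict after processing the prefix l
def InvA (l : List (Int × Int)) (d : PySem.Dict Int (PySem.Dict Int Int)) : Prop :=
  d.keys = PySem.List.dedup (l.map Prod.fst) ∧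
  (∀ p q, (d.getD p PySem.Dict.empty).getD q 0 = (l.count (p, q) : Int)) ∧
  (∀ p, (d.getD p PySem.Dict.empty).keys.Nodup) ∧
  (∀ p q, q ∈ (d.getD p PySem.Dict.empty).keys ↔ (p, q) ∈ l)

theorem stepA_unified (d : PySem.Dict Int (PySem.Dict Int Int)) (e : Int × Int) :
    calcAnswerStepA d e =
      d.insert e.1 ((d.getD e.1 PySem.Dict.empty).insert e.2
        ((d.getD e.1 PySem.Dict.empty).getD e.2 0 + 1)) := by
  unfold calcAnswerStepA
  by_cases h : d.contains e.1 = true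
  · simp only [h, if_true]
    by_cases h2 : (d.getD e.1 PySem.Dict.empty).contains e.2 = true
    · simp [h2]
    · simp only [Bool.not_eq_true] at h2
      simp [h2, PySem.Dict.getD_of_not_contains _ _ h2]
  · simp only [Bool.not_eq_true] at h
    simp [h, PySem.Dict.getD_of_not_contains _ _ h]

theorem dedup_append_singleton (xs : List Int) (x : Int) :
    PySem.List.dedup (xs ++ [x]) =
      if x ∈ xs then PySem.List.dedup xs else PySem.List.dedup xs ++ [x] := by
  have h1 : PySem.List.dedup (xs ++ [x]) = PySem.Set.add (PySem.List.dedup xs) x := by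
    simp [PySem.List.dedup_eq_ofList, PySem.Set.ofList_eq_foldl, List.foldl_append]
  rw [h1]
  by_cases hx : x ∈ xs
  · have hc : PySem.Set.contains (PySem.List.dedup xs) x = true := by
      simp [PySem.Set.contains, hx]
    simp [PySem.Set.add, hx]
  · have hc : PySem.Set.contains (PySem.List.dedup xs) x = false := by
      simp [PySem.Set.contains, hx]
    simp [PySem.Set.add, hx]

theorem invA_step (l : List (Int × Int)) (d : PySem.Dict Int (PySem.Dict Int Int))
    (e : Int × Int) (h : InvA l d) : InvA (l ++ [e]) (calcAnswerStepA d e) := by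
  obtain ⟨hkeys, hcnt, hnd, hmem⟩ := h
  obtain ⟨p0, q0⟩ := e
  rw [stepA_unified]
  refine ⟨?_, ?_, ?_, ?_⟩
  · -- keys track the ordered dedup of first coordinates
    rw [List.map_append, List.map_cons, List.map_nil, dedup_append_singleton, ← hkeys]
    by_cases hp : p0 ∈ List.map Prod.fst l
    · have hc : d.contains p0 = true := by
        rw [PySem.Dict.contains_eq_decide_mem_keys, hkeys]
        simp [hp]
      rw [if_pos hp, PySem.Dict.keys_insert_of_contains _ _ hc]
    · have hc : d.contains p0 = false := by
        rw [PySem.Dict.contains_eq_decide_mem_keys, hkeys]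
        simp [hp]
      rw [if_neg hp, PySem.Dict.keys_insert_of_not_contains _ _ hc]
  · -- counts
    intro p q
    rw [PySem.Dict.getD_insert]
    by_cases h1 : p = p0
    · subst h1
      rw [if_pos rfl, PySem.Dict.getD_insert]
      by_cases h2 : q = q0
      · subst h2
        rw [if_pos rfl, hcnt p q]
        simp [List.count_append]
      · rw [if_neg h2, hcnt p q]
        have : List.count (p, q) [(p, q0)] = 0 := by
          rw [List.count_eq_zero]
          intro hmem'
          rw [List.mem_singleton] at hmem'
          exact h2 (congrArg Prod.snd hmem')
        simp [List.count_append, this]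
    · rw [if_neg h1, hcnt p q]
      have : List.count (p, q) [(p0, q0)] = 0 := by
        rw [List.count_eq_zero]
        intro hmem'
        rw [List.mem_singleton] at hmem'
        exact h1 (congrArg Prod.fst hmem')
      simp [List.count_append, this]
  · -- inner key lists stay Nodup
    intro p
    rw [PySem.Dict.getD_insert]
    by_cases h1 : p = p0
    · rw [if_pos h1]
      exact PySem.Dict.nodup_keys_insert _ _ _ (h1 ▸ hnd p0)
    · rw [if_neg h1]; exact hnd p
  · -- inner key membership
    intro p q
    rw [PySem.Dict.getD_insert]
    by_cases h1 : p = p0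
    · subst h1
      rw [if_pos rfl]
      constructor
      · intro hq
        rcases (PySem.Dict.mem_keys_insert _ _ _ _).mp hq with h2 | h2
        · subst h2; simp
        · exact List.mem_append_left _ ((hmem p q).mp h2)
      · intro hq
        rcases List.mem_append.mp hq with h2 | h2
        · exact (PySem.Dict.mem_keys_insert _ _ _ _).mpr
            (Or.inr ((hmem p q).mpr h2))
        · rw [List.mem_singleton] at h2
          exact (PySem.Dict.mem_keys_insert _ _ _ _).mpr
            (Or.inl (congrArg Prod.snd h2))
    · rw [if_neg h1]
      constructor
      · intro hq
        exact List.mem_append_left _ ((hmem p q).mp hq)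
      · intro hq
        rcases List.mem_append.mp hq with h2 | h2
        · exact (hmem p q).mpr h2
        · rw [List.mem_singleton] at h2
          exact absurd (congrArg Prod.fst h2) h1

theorem invA_fold (pick : List (Int × Int)) :
    ∀ (l : List (Int × Int)) (d : PySem.Dict Int (PySem.Dict Int Int)), InvA l d →
      InvA (l ++ pick) (pick.foldl calcAnswerStepA d) := by
  induction pick with
  | nil => intro l d h; simpa using h
  | cons e t ih =>
      intro l d h
      have := ih (l ++ [e]) (calcAnswerStepA d e) (invA_step l d e h)
      simpa using this

-- two nonempty Int lists with the same members have the same Python max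
theorem max?_eq_of_mem_iff (l1 l2 : List Int) (hmem : ∀ x, x ∈ l1 ↔ x ∈ l2)
    (hne : l1 ≠ []) : PySem.List.max? l1 (fun x => x) = PySem.List.max? l2 (fun x => x) := by
  cases hm1 : PySem.List.max? l1 (fun x => x) with
  | none => exact absurd ((PySem.List.max?_eq_none_iff _ _).mp hm1) hne
  | some m1 =>
    cases hm2 : PySem.List.max? l2 (fun x => x) with
    | none =>
        have h2 : l2 = [] := (PySem.List.max?_eq_none_iff _ _).mp hm2
        have := (hmem m1).mp (PySem.List.max?_mem hm1)
        rw [h2] at this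
        exact absurd this (List.not_mem_nil)
    | some m2 =>
        have h12 : m1 ≤ m2 := PySem.List.max?_isMax hm2 m1 ((hmem m1).mp (PySem.List.max?_mem hm1))
        have h21 : m2 ≤ m1 := PySem.List.max?_isMax hm1 m2 ((hmem m2).mpr (PySem.List.max?_mem hm2))
        rw [le_antisymm h12 h21]

-- ===== VERDICT (by name: the statement is the Claim_ definition above) =====
theorem calcAnswer_spec : Claim_equal_calcAnswer := by
  intro n pick _
  unfold Spec_calcAnswer calcAnswer calcAnswer_alt
  have h0 : InvA [] PySem.Dict.empty := by
    refine ⟨by simp [PySem.Dict.keys_empty, PySem.List.dedup_eq_ofList,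
        PySem.Set.ofList_eq_foldl], ?_, ?_, ?_⟩
    · intro p q; simp [PySem.Dict.getD_empty]
    · intro p; simp [PySem.Dict.getD_empty, PySem.Dict.keys_empty]
    · intro p q; simp [PySem.Dict.getD_empty, PySem.Dict.keys_empty]
  have hInv := invA_fold pick [] PySem.Dict.empty h0
  rw [List.nil_append] at hInv
  set dA := pick.foldl calcAnswerStepA PySem.Dict.empty with hdA
  obtain ⟨hkeys, hcnt, hnd, hmem⟩ := hInv
  have hcongr : dA.keys.foldl (fun count p =>
      match PySem.List.max? (dA.getD p PySem.Dict.empty).values (fun x => x) with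
      | some v1 => if v1 > p then count + 1 else count
      | none => count) (0 : Int)
      = dA.keys.foldl (fun count p =>
          if calcAnswerPredB pick p then count + 1 else count) (0 : Int) := by
    apply PySem.List.foldl_congr_mem
    intro acc p hp
    have hpn : p ∈ List.map Prod.fst pick := by
      rw [hkeys] at hp
      exact (PySem.List.mem_dedup _ _).mp hp
    have hvals : (dA.getD p PySem.Dict.empty).values
        = (dA.getD p PySem.Dict.empty).keys.map (fun q => (dA.getD p PySem.Dict.empty).getD q 0) :=
      PySem.Dict.values_eq_map_keys _ (hnd p) 0
    have hsame : ∀ x, x ∈ (dA.getD p PySem.Dict.empty).values ↔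
        x ∈ (pick.filter (fun e => e.1 == p)).map (fun e => (PySem.List.count pick e : Int)) := by
      intro x
      rw [hvals]
      constructor
      · intro hx
        obtain ⟨q, hq, hqx⟩ := List.mem_map.mp hx
        have hpq : (p, q) ∈ pick := (hmem p q).mp hq
        refine List.mem_map.mpr ⟨(p, q), List.mem_filter.mpr ⟨hpq, by simp⟩, ?_⟩
        rw [PySem.List.count_eq, ← hcnt p q, hqx]
      · intro hx
        obtain ⟨⟨e1, e2⟩, he, hex⟩ := List.mem_map.mp hx
        obtain ⟨hepick, hefst⟩ := List.mem_filter.mp he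
        have hefst' : e1 = p := by simpa using hefst
        subst hefst'
        refine List.mem_map.mpr ⟨e2, (hmem e1 e2).mpr hepick, ?_⟩
        rw [hcnt e1 e2, ← PySem.List.count_eq, ← hex]
    have hvne : (dA.getD p PySem.Dict.empty).values ≠ [] := by
      obtain ⟨⟨e1, e2⟩, hepick, hefst⟩ := List.mem_map.mp hpn
      have hefst' : e1 = p := hefst
      subst hefst'
      have : e2 ∈ (dA.getD e1 PySem.Dict.empty).keys := (hmem e1 e2).mpr hepick
      rw [hvals]
      intro hcontra
      rw [List.map_eq_nil_iff.mp hcontra] at this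
      exact absurd this (List.not_mem_nil)
    have hmax := max?_eq_of_mem_iff _ _ hsame hvne
    rw [hmax]
    unfold calcAnswerPredB
    cases hmx : PySem.List.max?
        ((pick.filter (fun e => e.1 == p)).map (fun e => (PySem.List.count pick e : Int)))
        (fun x => x) with
    | none =>
        exact absurd ((PySem.List.max?_eq_none_iff _ _).mp (hmax.trans hmx)) hvne
    | some v => simp
  rw [hcongr, PySem.List.foldl_if_add_one, hkeys]
  simp [List.countP_eq_length_filter]
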